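-- pv_equiv track=rewrite | github.com/matteozullo/Miscellanea | covid19-simulation.py | day_report
-- ===== SOURCE A (Python) =====
-- def day_report(sick__: list, sick: list) -> list:
--   """
--   Returns a summary of new cases, deaths, and recovered patients.
--
--   :param pop__: population at prior time-period
--   :param pop: population at current time-period
--   :return: list holding summary stats
--   """
--   cases, recovered, deaths = 0,0,0
--
--   # for each individual
--   for before, after in zip(sick__, sick):
--     # if before-after statuses differ
--     if before != after:
--       if after == 3: deaths += 1
--       if after == 2: recovered += 1
--       if after == 1: cases += 1
--   return [cases, recovered, deaths]
-- ===== SOURCE B (Python) =====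
-- def day_report(sick__: list, sick: list) -> list:
--   """Summary stats via counting: entries with status s after minus those already s before.
--
--   For any s, a pair changed TO s iff after == s and before != s, so the number of
--   new-s entries is count of s among the paired suffix statuses minus the number of
--   pairs that were (s, s)."""
--   m = min(len(sick__), len(sick))
--   pairs = list(zip(sick__, sick))
--   return [sick[:m].count(s) - pairs.count((s, s)) for s in (1, 2, 3)]
-- ===== Notes on version B (the rewrite author's own statement) =====
-- stated objective: alternative
-- what changed: Replaces the single loop with per-status branching by a counting identity: for each status s the answer is count of s in the paired part of sick minus the number of unchanged (s,s) pairs, computed with list.count passes and a subtraction, no change-filtering loop at all.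
import Mathlib
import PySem

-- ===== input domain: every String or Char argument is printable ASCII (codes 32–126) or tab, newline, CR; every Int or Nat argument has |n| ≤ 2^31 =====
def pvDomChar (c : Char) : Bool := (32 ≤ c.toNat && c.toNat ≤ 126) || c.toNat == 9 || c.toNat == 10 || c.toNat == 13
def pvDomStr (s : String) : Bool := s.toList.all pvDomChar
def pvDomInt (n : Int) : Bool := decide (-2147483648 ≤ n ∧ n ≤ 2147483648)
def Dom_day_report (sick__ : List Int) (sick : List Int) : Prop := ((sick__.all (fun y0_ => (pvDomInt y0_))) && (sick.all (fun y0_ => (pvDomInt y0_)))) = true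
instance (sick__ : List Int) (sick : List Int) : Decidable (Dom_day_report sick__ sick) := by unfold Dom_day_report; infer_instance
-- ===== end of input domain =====

-- B replaces A's single change-filtering loop with three counters by a counting
-- identity per status (count of s in the paired part of sick minus unchanged
-- (s,s) pairs); alternative decomposition, same O(n) cost.


-- ===== PORT A =====
def day_report (sick__ : List Int) (sick : List Int) : List Int :=
  let st := (sick__.zip sick).foldl
    (fun (s : Int × Int × Int) (p : Int × Int) =>
      if p.1 ≠ p.2 then
        ((if p.2 = 1 then s.1 + 1 else s.1),
         (if p.2 = 2 then s.2.1 + 1 else s.2.1),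
         (if p.2 = 3 then s.2.2 + 1 else s.2.2))
      else s)
    (0, 0, 0)
  [st.1, st.2.1, st.2.2]

-- ===== PORT B =====
def day_report_alt (sick__ : List Int) (sick : List Int) : List Int :=
  let m := min sick__.length sick.length
  let pairs := sick__.zip sick
  [(1 : Int), 2, 3].map (fun s => ((sick.take m).count s : Int) - (pairs.count (s, s) : Int))

-- ===== PRECONDITION & SPEC =====
def Spec_day_report (sick__ : List Int) (sick : List Int) (out : List Int) : Prop := out = day_report_alt sick__ sick
instance (sick__ : List Int) (sick : List Int) (out : List Int) : Decidable (Spec_day_report sick__ sick out) := by unfold Spec_day_report; infer_instance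

-- ===== CLAIM (what is proved, stated in full; the proofs are below) =====
def Claim_equal_day_report : Prop := ∀ (sick__ : List Int) (sick : List Int), Dom_day_report sick__ sick → Spec_day_report sick__ sick (day_report sick__ sick)

-- ===== LEMMAS AND PROOFS =====

-- A's fold adds to each starting counter the count of the corresponding status
-- among the changed entries.
theorem day_report_foldA (l : List (Int × Int)) (c r d : Int) :
    l.foldl
      (fun (s : Int × Int × Int) (p : Int × Int) =>
        if p.1 ≠ p.2 then
          ((if p.2 = 1 then s.1 + 1 else s.1),
           (if p.2 = 2 then s.2.1 + 1 else s.2.1),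
           (if p.2 = 3 then s.2.2 + 1 else s.2.2))
        else s)
      (c, r, d)
      = (c + ((l.filter (fun p => p.1 ≠ p.2)).map (fun p => p.2)).count 1,
         r + ((l.filter (fun p => p.1 ≠ p.2)).map (fun p => p.2)).count 2,
         d + ((l.filter (fun p => p.1 ≠ p.2)).map (fun p => p.2)).count 3) := by
  induction l generalizing c r d with
  | nil => simp
  | cons p t ih =>
    by_cases h : p.1 ≠ p.2
    · rw [List.foldl_cons, if_pos h, ih, List.filter_cons_of_pos (by simpa using h)]
      simp only [List.map_cons, List.count_cons, Prod.mk.injEq]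
      refine ⟨?_, ?_, ?_⟩ <;> split_ifs <;> simp_all <;> ring
    · rw [List.foldl_cons, if_neg h, ih, List.filter_cons_of_neg (by simpa using h)]

-- Counting identity: changed-to-s entries = all s entries minus unchanged (s,s) pairs.
theorem day_report_countB (l : List (Int × Int)) (s : Int) :
    ((l.filter (fun p => p.1 ≠ p.2)).map (fun p => p.2)).count s + l.count (s, s)
      = (l.map (fun p => p.2)).count s := by
  induction l with
  | nil => simp
  | cons p t ih =>
    by_cases h : p.1 ≠ p.2
    · rw [List.filter_cons_of_pos (by simpa using h)]
      simp only [List.map_cons, List.count_cons, ← ih]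
      have : ¬ p = (s, s) := by
        rintro rfl; exact h rfl
      simp [this]
      omega
    · rw [List.filter_cons_of_neg (by simpa using h)]
      rw [not_not] at h
      simp only [List.map_cons, List.count_cons, ← ih]
      by_cases hs : p.2 = s
      · have : p = (s, s) := by cases p; simp_all
        simp [this]
        omega
      · have : ¬ p = (s, s) := by rintro rfl; exact hs rfl
        simp [this, hs]

-- The paired statuses of sick are its prefix of the zipped length.
theorem day_report_mapsnd (xs ys : List Int) :
    (xs.zip ys).map (fun p : Int × Int => p.2) = ys.take (min xs.length ys.length) := by
  induction xs generalizing ys with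
  | nil => simp
  | cons x xt ih =>
    cases ys with
    | nil => simp
    | cons y yt => simpa [Nat.succ_min_succ] using ih yt

theorem day_report_eq (sick__ sick : List Int) :
    day_report sick__ sick = day_report_alt sick__ sick := by
  unfold day_report day_report_alt
  rw [day_report_foldA]
  have h := fun s => day_report_countB (sick__.zip sick) s
  rw [day_report_mapsnd] at h
  simp only [List.map_cons, List.map_nil, List.cons.injEq, and_true]
  refine ⟨?_, ?_, ?_⟩ <;>
    [have h1 := h 1; have h1 := h 2; have h1 := h 3] <;> omega

-- ===== VERDICT (by name: the statement is the Claim_ definition above) =====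
theorem day_report_spec : Claim_equal_day_report := by
  intro sick__ sick _
  exact day_report_eq sick__ sick
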